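-- pv_equiv track=rewrite | github.com/kkr010128/codebert | problem219/problem219_17.py | solve
-- ===== SOURCE A (Python) =====
-- def solve(N):
--     res = 0
--     flg = 0
--     for n in reversed(N):
--         if flg == 2:
--             if n >= 5:
--                 flg = 1
--             else:
--                 flg = 0
--         m = flg + n
--         if m == 5:
--             res += 5
--             flg = 2
--         elif m < 5:
--             res += m
--             flg = 0
--         else:
--             res += (10 - m)
--             flg = 1
--     return res + flg%2
-- ===== SOURCE B (Python) =====
-- def solve(N):
--     # Two-state digit DP (LSB to MSB): dp0 = min coins paying suffix exactly,
--     # dp1 = min coins overpaying by one carry into the next denomination.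
--     dp0, dp1 = 0, 1
--     for d in reversed(N):
--         dp0, dp1 = min(dp0 + d, dp1 + d + 1), min(dp0 + 10 - d, dp1 + 9 - d)
--     return min(dp0, dp1 + 1)
-- ===== Notes on version B (the rewrite author's own statement) =====
-- stated objective: alternative
-- what changed: Replaced the greedy flag state machine (flg in {0,1,2} with a lookahead tie state) by the canonical two-state digit DP that keeps both candidates (pay exactly / overpay with carry) at every step.
import Mathlib
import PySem

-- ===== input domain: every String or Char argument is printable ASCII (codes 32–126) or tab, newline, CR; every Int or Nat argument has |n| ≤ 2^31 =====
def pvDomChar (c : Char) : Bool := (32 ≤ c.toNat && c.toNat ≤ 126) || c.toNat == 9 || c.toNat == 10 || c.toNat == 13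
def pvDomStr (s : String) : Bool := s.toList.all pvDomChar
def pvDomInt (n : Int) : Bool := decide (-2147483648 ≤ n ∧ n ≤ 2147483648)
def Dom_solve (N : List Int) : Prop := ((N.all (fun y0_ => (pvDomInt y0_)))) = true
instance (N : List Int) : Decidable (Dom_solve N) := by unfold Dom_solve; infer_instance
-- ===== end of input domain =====

-- ===== PORT A =====
-- B replaces A's greedy flag state machine by a two-state digit DP; same O(n) cost, equal return value.
def solveStep (s : Int × Int) (n : Int) : Int × Int :=
  let flg : Int := if s.2 = 2 then (if n ≥ 5 then 1 else 0) else s.2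
  let m := flg + n
  if m = 5 then (s.1 + 5, 2)
  else if m < 5 then (s.1 + m, 0)
  else (s.1 + (10 - m), 1)

def solve (N : List Int) : Int :=
  let s := N.reverse.foldl solveStep (0, 0)
  s.1 + PySem.Int.mod s.2 2

-- ===== PORT B =====
def solveAltStep (s : Int × Int) (d : Int) : Int × Int :=
  (min (s.1 + d) (s.2 + d + 1), min (s.1 + 10 - d) (s.2 + 9 - d))

def solve_alt (N : List Int) : Int :=
  let s := N.reverse.foldl solveAltStep (0, 1)
  min s.1 (s.2 + 1)

-- ===== PRECONDITION & SPEC =====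
def Spec_solve (N : List Int) (out : Int) : Prop := out = solve_alt N
instance (N : List Int) (out : Int) : Decidable (Spec_solve N out) := by unfold Spec_solve; infer_instance

-- ===== CLAIM (what is proved, stated in full; the proofs are below) =====
def Claim_equal_solve : Prop := ∀ (N : List Int), Dom_solve N → Spec_solve N (solve N)

-- ===== LEMMAS AND PROOFS =====
-- Invariant linking A's state (res, flg) to B's DP state (d0, d1) after processing
-- the same suffix of digits (LSB first).
def SolveInv (res flg d0 d1 : Int) : Prop :=
  (flg = 0 ∧ d0 = res ∧ res + 1 ≤ d1) ∨
  (flg = 1 ∧ d1 = res ∧ res + 1 ≤ d0) ∨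
  (flg = 2 ∧ d0 = res ∧ d1 = res)

theorem solveStep_inv (res flg d0 d1 n : Int) (h : SolveInv res flg d0 d1) :
    SolveInv (solveStep (res, flg) n).1 (solveStep (res, flg) n).2
      (solveAltStep (d0, d1) n).1 (solveAltStep (d0, d1) n).2 := by
  unfold SolveInv solveStep solveAltStep at *
  dsimp only
  split_ifs <;> simp_all <;> omega

theorem solve_fold_inv (L : List Int) (res flg d0 d1 : Int) (h : SolveInv res flg d0 d1) :
    SolveInv (L.foldl solveStep (res, flg)).1 (L.foldl solveStep (res, flg)).2
      (L.foldl solveAltStep (d0, d1)).1 (L.foldl solveAltStep (d0, d1)).2 := by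
  induction L generalizing res flg d0 d1 with
  | nil => exact h
  | cons n L ih =>
      simpa using ih _ _ _ _ (solveStep_inv res flg d0 d1 n h)

-- ===== VERDICT (by name: the statement is the Claim_ definition above) =====
theorem solve_spec : Claim_equal_solve := by
  intro N _
  unfold Spec_solve solve solve_alt
  have h := solve_fold_inv N.reverse 0 0 0 1 (Or.inl ⟨rfl, rfl, by norm_num⟩)
  set sA := N.reverse.foldl solveStep (0, 0) with hA
  set sB := N.reverse.foldl solveAltStep (0, 1) with hB
  show sA.1 + PySem.Int.mod sA.2 2 = min sB.1 (sB.2 + 1)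
  rcases h with ⟨h0, h1, h2⟩ | ⟨h0, h1, h2⟩ | ⟨h0, h1, h2⟩ <;> rw [h0] <;>
    [skip; skip; skip] <;>
    first
      | (have : PySem.Int.mod (0:Int) 2 = 0 := by decide
         rw [this]; omega)
      | (have : PySem.Int.mod (1:Int) 2 = 1 := by decide
         rw [this]; omega)
      | (have : PySem.Int.mod (2:Int) 2 = 0 := by decide
         rw [this]; omega)
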